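-- pv_equiv track=rewrite | github.com/geovani-moc/Simulated-Annealing | simulatedAnnealing.py | subDiagonal1
-- ===== SOURCE A (Python) =====
-- def subDiagonal1(item):
--     tam = len(item)
--     aux = 0
--     result =0
--     for i in range(tam-1):
--         aux = 0
--         for j in range(tam - i):
--             if item[j][j+i] == 1:
--                 aux +=1
--         if aux > 1:
--             result += aux-1
--     return result
-- ===== SOURCE B (Python) =====
-- def subDiagonal1(item):
--     tam = len(item)
--     counter = [0] * tam
--     for r in range(tam):
--         for c in range(r, tam):
--             if item[r][c] == 1:
--                 counter[c - r] += 1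
--     return sum(v - 1 for v in counter if v > 1)
-- ===== Notes on version B (the rewrite author's own statement) =====
-- stated objective: alternative
-- what changed: B replaces A's per-diagonal scan (outer loop over offsets, inner scalar-accumulator scan down each diagonal) by a single row-major pass that tallies the 1s into a table indexed by diagonal offset c-r, then sums max(0,v-1) over the table.
-- outside the precondition, e.g. on subDiagonal1([[0], [0, 0]]): A returns 0, B raises IndexError; on subDiagonal1([[]]): A returns 0, B raises IndexError
import Mathlib
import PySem

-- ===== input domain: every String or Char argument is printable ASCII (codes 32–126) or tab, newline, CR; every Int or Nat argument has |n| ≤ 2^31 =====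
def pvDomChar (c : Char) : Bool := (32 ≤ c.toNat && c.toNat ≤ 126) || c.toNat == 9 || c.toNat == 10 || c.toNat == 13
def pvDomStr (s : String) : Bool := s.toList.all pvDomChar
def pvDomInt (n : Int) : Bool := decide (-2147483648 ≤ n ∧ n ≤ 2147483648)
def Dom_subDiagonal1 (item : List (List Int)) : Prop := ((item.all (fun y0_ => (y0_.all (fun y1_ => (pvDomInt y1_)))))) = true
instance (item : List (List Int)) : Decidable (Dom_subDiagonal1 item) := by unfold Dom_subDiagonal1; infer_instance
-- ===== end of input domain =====

-- B replaces A's per-diagonal offset scan by one row-major pass that tallies the 1s of each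
-- diagonal into a table indexed by the offset c-r, then sums max(0,v-1) over the table
-- (alternative decomposition, same asymptotic cost).


-- ===== PORT A =====
def subDiagonal1 (item : List (List Int)) : Int :=
  let tam : Int := item.length
  (PySem.List.pyRange 0 (tam - 1) 1).foldl (fun result i =>
    let aux : Int := (PySem.List.pyRange 0 (tam - i) 1).foldl (fun aux j =>
      if PySem.List.pyGetD (PySem.List.pyGetD item j []) (j + i) 0 = 1 then aux + 1 else aux) 0
    if aux > 1 then result + (aux - 1) else result) 0

-- ===== PORT B =====
def subDiagonal1_alt (item : List (List Int)) : Int :=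
  let tam : Int := item.length
  let counter : List Int :=
    (PySem.List.pyRange 0 tam 1).foldl (fun counter r =>
      (PySem.List.pyRange r tam 1).foldl (fun counter c =>
        if PySem.List.pyGetD (PySem.List.pyGetD item r []) c 0 = 1 then
          PySem.List.pySetD counter (c - r) (PySem.List.pyGetD counter (c - r) 0 + 1)
        else counter) counter)
      (List.replicate item.length (0 : Int))
  ((counter.filter (fun v => v > 1)).map (fun v => v - 1)).sum

-- ===== PRECONDITION & SPEC =====
-- Pre_ excludes ragged matrices with a row shorter than len(item): B's row-major scan raises
-- IndexError on some of them while A, which never reads cell (0, len-1), may still return.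
def Pre_subDiagonal1 (item : List (List Int)) : Prop :=
  ∀ row ∈ item, item.length ≤ row.length
instance (item : List (List Int)) : Decidable (Pre_subDiagonal1 item) := by
  unfold Pre_subDiagonal1; infer_instance
def pvWitness_subDiagonal1 : List (List Int) := [[1, 0], [0, 1]]
def Spec_subDiagonal1 (item : List (List Int)) (out : Int) : Prop := out = subDiagonal1_alt item
instance (item : List (List Int)) (out : Int) : Decidable (Spec_subDiagonal1 item out) := by unfold Spec_subDiagonal1; infer_instance

-- ===== CLAIM (what is proved, stated in full; the proofs are below) =====
def Claim_equal_subDiagonal1 : Prop := ∀ (item : List (List Int)), Dom_subDiagonal1 item → Pre_subDiagonal1 item → Spec_subDiagonal1 item (subDiagonal1 item)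

-- ===== LEMMAS AND PROOFS =====

theorem pen_sum (l : List Int) (a : Int) :
    l.foldl (fun acc v => if v > 1 then acc + (v - 1) else acc) a
      = a + ((l.filter (fun v => v > 1)).map (fun v => v - 1)).sum := by
  induction l generalizing a with
  | nil => simp
  | cons x xs ih =>
    simp only [List.foldl_cons, List.filter_cons]
    by_cases h : x > 1
    · simp [h, ih]; ring
    · simp [h, ih]


def pvCell (item : List (List Int)) (r c : Int) : Int :=
  PySem.List.pyGetD (PySem.List.pyGetD item r []) c 0

def pvCnt (item : List (List Int)) (n i : Int) : Int :=
  (PySem.List.pyRange 0 (n - i) 1).foldl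
    (fun aux j => if pvCell item j (j + i) = 1 then aux + 1 else aux) 0

theorem getD_pySetD (cs : List Int) (i v : Int) (hi : 0 ≤ i) (hil : i < cs.length) (m : Nat) :
    PySem.List.pyGetD (PySem.List.pySetD cs i v) (m : Int) 0
      = if (m : Int) = i then v else PySem.List.pyGetD cs (m : Int) 0 := by
  rw [PySem.List.pySetD_of_nonneg cs v hi]
  simp only [PySem.List.pyGetD_natCast]
  by_cases h : m = i.toNat
  · subst h
    have hl : i.toNat < cs.length := by omega
    have he : ((i.toNat : Int)) = i := Int.toNat_of_nonneg hi
    simp [List.getD, hl, he]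
  · have h2 : ¬ ((m:Int) = i) := by omega
    have h3 : ¬ (i.toNat = m) := fun hh => h hh.symm
    simp [List.getD, h2, h3]

theorem rowFold (item : List (List Int)) (n r : Int) (hr : 0 ≤ r) :
    ∀ (t : Nat) (c0 : Int) (cs : List Int), r ≤ c0 → (n - c0).toNat = t →
      ((cs.length : Int) = n) →
      (((PySem.List.pyRange c0 n 1).foldl (fun counter c =>
          if PySem.List.pyGetD (PySem.List.pyGetD item r []) c 0 = 1 then
            PySem.List.pySetD counter (c - r) (PySem.List.pyGetD counter (c - r) 0 + 1)
          else counter) cs).length = cs.length)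
      ∧ ∀ m : Nat,
        PySem.List.pyGetD ((PySem.List.pyRange c0 n 1).foldl (fun counter c =>
          if PySem.List.pyGetD (PySem.List.pyGetD item r []) c 0 = 1 then
            PySem.List.pySetD counter (c - r) (PySem.List.pyGetD counter (c - r) 0 + 1)
          else counter) cs) (m : Int) 0
        = PySem.List.pyGetD cs (m : Int) 0
          + (if c0 ≤ r + m ∧ r + (m : Int) < n ∧ pvCell item r (r + m) = 1 then 1 else 0) := by
  intro t
  induction t with
  | zero =>
    intro c0 cs hc0 ht hlen
    have hnc : n ≤ c0 := by omega
    rw [PySem.List.pyRange_one_eq_nil hnc]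
    refine ⟨rfl, fun m => ?_⟩
    simp only [List.foldl_nil]
    have hneg : ¬(c0 ≤ r + (m:Int) ∧ r + (m:Int) < n ∧ pvCell item r (r + m) = 1) := by
      rintro ⟨h1, h2, _⟩; omega
    rw [if_neg hneg]; ring
  | succ t ih =>
    intro c0 cs hc0 ht hlen
    have hlt : c0 < n := by omega
    rw [PySem.List.pyRange_one_cons hlt, List.foldl_cons]
    have hstep : ∀ m : Nat,
        PySem.List.pyGetD (if PySem.List.pyGetD (PySem.List.pyGetD item r []) c0 0 = 1 then
            PySem.List.pySetD cs (c0 - r) (PySem.List.pyGetD cs (c0 - r) 0 + 1)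
          else cs) (m : Int) 0
        = PySem.List.pyGetD cs (m : Int) 0
          + (if c0 = r + m ∧ pvCell item r (r + m) = 1 then 1 else 0) := by
      intro m
      by_cases hcell : PySem.List.pyGetD (PySem.List.pyGetD item r []) c0 0 = 1
      · rw [if_pos hcell]
        rw [getD_pySetD cs (c0 - r) _ (by omega) (by omega) m]
        by_cases hm : (m:Int) = c0 - r
        · have hc : c0 = r + (m:Int) := by omega
          have hcell' : pvCell item r (r + m) = 1 := by rw [← hc]; exact hcell
          rw [if_pos hm, if_pos ⟨hc, hcell'⟩]
          have : (m:Int) = c0 - r := hm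
          rw [show PySem.List.pyGetD cs (c0 - r) 0 = PySem.List.pyGetD cs (m:Int) 0 by rw [hm]]
        · rw [if_neg hm, if_neg (by rintro ⟨h1, _⟩; omega)]; ring
      · rw [if_neg hcell]
        have : ¬(c0 = r + (m:Int) ∧ pvCell item r (r + m) = 1) := by
          rintro ⟨h1, h2⟩; exact hcell (by rw [show c0 = r + (m:Int) from h1]; exact h2)
        rw [if_neg this]; ring
    have hlen1 : ((if PySem.List.pyGetD (PySem.List.pyGetD item r []) c0 0 = 1 then
            PySem.List.pySetD cs (c0 - r) (PySem.List.pyGetD cs (c0 - r) 0 + 1)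
          else cs).length) = cs.length := by
      split <;> simp [PySem.List.length_pySetD]
    obtain ⟨ihl, ihg⟩ := ih (c0 + 1) _ (by omega) (by omega) (by rw [hlen1]; exact hlen)
    refine ⟨by rw [ihl, hlen1], fun m => ?_⟩
    rw [ihg m, hstep m]
    by_cases h1 : c0 = r + (m:Int) ∧ pvCell item r (r + m) = 1
    · rw [if_pos h1]
      rw [if_neg (by rintro ⟨ha, _⟩; omega), if_pos ⟨by omega, by omega, h1.2⟩]; ring
    · rw [if_neg h1]
      by_cases h2 : c0 + 1 ≤ r + (m:Int) ∧ r + (m:Int) < n ∧ pvCell item r (r + m) = 1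
      · rw [if_pos h2, if_pos ⟨by omega, h2.2⟩]; ring
      · rw [if_neg h2, if_neg ?_]
        · ring
        · rintro ⟨ha, hb, hc⟩
          exact h2 ⟨by omega, hb, hc⟩
          -- unless c0 = r+m, but then h1 fails with hc

theorem rowsFold (item : List (List Int)) (n : Int) :
    ∀ (t : Nat) (r0 : Int) (cs : List Int), 0 ≤ r0 → (n - r0).toNat = t →
      ((cs.length : Int) = n) →
      (((PySem.List.pyRange r0 n 1).foldl (fun counter r =>
          (PySem.List.pyRange r n 1).foldl (fun counter c =>
            if PySem.List.pyGetD (PySem.List.pyGetD item r []) c 0 = 1 then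
              PySem.List.pySetD counter (c - r) (PySem.List.pyGetD counter (c - r) 0 + 1)
            else counter) counter) cs).length = cs.length)
      ∧ ∀ m : Nat,
        PySem.List.pyGetD ((PySem.List.pyRange r0 n 1).foldl (fun counter r =>
          (PySem.List.pyRange r n 1).foldl (fun counter c =>
            if PySem.List.pyGetD (PySem.List.pyGetD item r []) c 0 = 1 then
              PySem.List.pySetD counter (c - r) (PySem.List.pyGetD counter (c - r) 0 + 1)
            else counter) counter) cs) (m : Int) 0
        = PySem.List.pyGetD cs (m : Int) 0
          + ((PySem.List.pyRange r0 n 1).map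
              (fun r => if r + (m : Int) < n ∧ pvCell item r (r + m) = 1 then (1:Int) else 0)).sum := by
  intro t
  induction t with
  | zero =>
    intro r0 cs hr0 ht hlen
    have hnr : n ≤ r0 := by omega
    rw [PySem.List.pyRange_one_eq_nil hnr]
    exact ⟨rfl, fun m => by simp⟩
  | succ t ih =>
    intro r0 cs hr0 ht hlen
    have hlt : r0 < n := by omega
    rw [PySem.List.pyRange_one_cons hlt, List.foldl_cons]
    obtain ⟨rl, rg⟩ := rowFold item n r0 hr0 t.succ r0 cs le_rfl (by omega) hlen
    obtain ⟨ihl, ihg⟩ := ih (r0 + 1) _ (by omega) (by omega) (by rw [rl]; exact hlen)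
    refine ⟨by rw [ihl, rl], fun m => ?_⟩
    rw [List.map_cons, List.sum_cons, ihg m, rg m]
    have hcond : (r0 ≤ r0 + (m:Int) ∧ r0 + (m:Int) < n ∧ pvCell item r0 (r0 + m) = 1)
        ↔ (r0 + (m:Int) < n ∧ pvCell item r0 (r0 + m) = 1) := by
      constructor
      · rintro ⟨_, h2, h3⟩; exact ⟨h2, h3⟩
      · rintro ⟨h2, h3⟩; exact ⟨by omega, h2, h3⟩
    by_cases h : r0 + (m:Int) < n ∧ pvCell item r0 (r0 + m) = 1
    · rw [if_pos (hcond.mpr h), if_pos h]; ring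
    · rw [if_neg (fun hh => h (hcond.mp hh)), if_neg h]; ring

theorem cnt_eq_sum (item : List (List Int)) (n i : Int) :
    pvCnt item n i
      = ((PySem.List.pyRange 0 (n - i) 1).map
          (fun j => if pvCell item j (j + i) = 1 then (1:Int) else 0)).sum := by
  unfold pvCnt
  rw [PySem.List.foldl_congr_mem _ _
      (fun acc j => acc + if pvCell item j (j + i) = 1 then (1:Int) else 0) 0
      (fun acc x _ => by split <;> rename_i h <;> simp [h])]
  rw [PySem.List.foldl_add]
  simp

theorem diag_sum (item : List (List Int)) (n : Int) (m : Nat) (hm : (m : Int) < n) :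
    ((PySem.List.pyRange 0 n 1).map
        (fun r => if r + (m : Int) < n ∧ pvCell item r (r + m) = 1 then (1:Int) else 0)).sum
      = pvCnt item n m := by
  rw [PySem.List.pyRange_one_append 0 (n - m) n (by omega) (by omega),
      List.map_append, List.sum_append]
  have h1 : ((PySem.List.pyRange 0 (n - m) 1).map
      (fun r => if r + (m : Int) < n ∧ pvCell item r (r + m) = 1 then (1:Int) else 0))
      = ((PySem.List.pyRange 0 (n - m) 1).map
      (fun r => if pvCell item r (r + m) = 1 then (1:Int) else 0)) := by
    apply List.map_congr_left
    intro r hr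
    have := (PySem.List.mem_pyRange_one.mp hr)
    have hc : r + (m : Int) < n := by omega
    by_cases h : pvCell item r (r + m) = 1
    · rw [if_pos ⟨hc, h⟩, if_pos h]
    · rw [if_neg (by rintro ⟨_, hh⟩; exact h hh), if_neg h]
  have h2 : (((PySem.List.pyRange (n - m) n 1).map
      (fun r => if r + (m : Int) < n ∧ pvCell item r (r + m) = 1 then (1:Int) else 0))).sum = 0 := by
    apply List.sum_eq_zero
    intro x hx
    obtain ⟨r, hr, hfx⟩ := List.mem_map.mp hx
    have := (PySem.List.mem_pyRange_one.mp hr)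
    rw [if_neg (by rintro ⟨hh, _⟩; omega)] at hfx
    exact hfx.symm
  rw [h1, h2, cnt_eq_sum]
  ring

-- ===== VERDICT (by name: the statement is the Claim_ definition above) =====
theorem subDiagonal1_spec : Claim_equal_subDiagonal1 := by
  intro item _ _
  unfold Spec_subDiagonal1 subDiagonal1_alt
  simp only []
  -- abbreviations
  have hn0 : (0:Int) ≤ (item.length : Int) := by positivity
  obtain ⟨hClen, hCget⟩ := rowsFold item (item.length : Int) ((item.length : Int)).toNat 0
      (List.replicate item.length (0:Int)) le_rfl (by omega) (by simp)
  set n : Int := (item.length : Int) with hn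
  set C : List Int := (PySem.List.pyRange 0 n 1).foldl (fun counter r =>
      (PySem.List.pyRange r n 1).foldl (fun counter c =>
        if PySem.List.pyGetD (PySem.List.pyGetD item r []) c 0 = 1 then
          PySem.List.pySetD counter (c - r) (PySem.List.pyGetD counter (c - r) 0 + 1)
        else counter) counter) (List.replicate item.length (0:Int)) with hC
  -- C is the diagonal-count table
  have hCmap : C = (PySem.List.pyRange 0 n 1).map (fun d => pvCnt item n d) := by
    apply List.ext_getElem
    · rw [hClen, List.length_replicate, List.length_map, PySem.List.length_pyRange_one]
      omega
    · intro k h1 h2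
      have hkn : (k : Int) < n := by
        have h3 : k < C.length := h1
        rw [hClen] at h3
        simp only [List.length_replicate] at h3
        omega
      have hget := hCget k
      rw [PySem.List.pyGetD_natCast, PySem.List.pyGetD_natCast] at hget
      have hrep : (List.replicate item.length (0:Int)).getD k 0 = 0 := by
        simp only [List.getD, List.getElem?_replicate]
        split <;> rfl
      rw [hrep, diag_sum item n k hkn, zero_add] at hget
      have hCk : C.getD k 0 = C[k] := List.getD_eq_getElem C 0 h1
      rw [← hCk, hget]
      rw [List.getElem_map, PySem.List.getElem_pyRange_one]
      norm_num
  -- B as a fold of the penalty over the table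
  have hB : ((C.filter (fun v => v > 1)).map (fun v => v - 1)).sum
      = C.foldl (fun acc v => if v > 1 then acc + (v - 1) else acc) 0 := by
    rw [pen_sum C 0]; ring
  rw [hB, hCmap, List.foldl_map]
  -- A as the same fold over range(n-1)
  show subDiagonal1 item
      = (PySem.List.pyRange 0 n 1).foldl
          (fun acc d => if pvCnt item n d > 1 then acc + (pvCnt item n d - 1) else acc) 0
  have hA : subDiagonal1 item
      = (PySem.List.pyRange 0 (n - 1) 1).foldl
          (fun acc d => if pvCnt item n d > 1 then acc + (pvCnt item n d - 1) else acc) 0 := rfl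
  by_cases hne : item.length = 0
  · rw [hA]
    rw [PySem.List.pyRange_one_eq_nil (a := (0:Int)) (b := n - 1) (by omega),
        PySem.List.pyRange_one_eq_nil (a := (0:Int)) (b := n) (by omega)]
  · have hsplit : PySem.List.pyRange 0 n 1 = PySem.List.pyRange 0 (n - 1) 1 ++ [n - 1] := by
      have := PySem.List.pyRange_one_succ_right (a := (0:Int)) (b := n - 1) (by omega)
      simpa using this
    rw [hsplit, List.foldl_append, hA]
    simp only [List.foldl_cons, List.foldl_nil]
    have hlast : pvCnt item n (n - 1) ≤ 1 := by
      unfold pvCnt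
      rw [show n - (n - 1) = 1 by ring]
      rw [show PySem.List.pyRange 0 1 1 = [0] from by simpa using PySem.List.pyRange_one_singleton 0]
      simp only [List.foldl_cons, List.foldl_nil]
      split <;> omega
    rw [if_neg (by omega)]
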